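-- pv_equiv track=rewrite | github.com/hy5sun/Algorithm | 프로그래머스/unrated/133502. 햄버거 만들기/햄버거 만들기.py | solution
-- ===== SOURCE A (Python) =====
-- def solution(ingredient):
--     answer = 0
--     i = 0
--     while i < len(ingredient)-3:
--         if ingredient[i:i+4] == [1, 2, 3, 1]:
--             del ingredient[i:i+4]
--             answer += 1
--             i -= 4
--         else:
--             i+=1
--     return answer
-- ===== SOURCE B (Python) =====
-- def solution(ingredient):
--     answer = 0
--     stack = []
--     for x in ingredient:
--         stack.append(x)
--         if stack[-4:] == [1, 2, 3, 1]:
--             del stack[-4:]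
--             answer += 1
--     return answer
-- ===== Notes on version B (the rewrite author's own statement) =====
-- stated objective: faster
-- what changed: Replaced the index-backtracking scan with repeated slice deletion from the middle of the list by a single left-to-right pass over the input that pushes each ingredient on a stack and pops whenever the top four form [1,2,3,1].
import Mathlib
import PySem

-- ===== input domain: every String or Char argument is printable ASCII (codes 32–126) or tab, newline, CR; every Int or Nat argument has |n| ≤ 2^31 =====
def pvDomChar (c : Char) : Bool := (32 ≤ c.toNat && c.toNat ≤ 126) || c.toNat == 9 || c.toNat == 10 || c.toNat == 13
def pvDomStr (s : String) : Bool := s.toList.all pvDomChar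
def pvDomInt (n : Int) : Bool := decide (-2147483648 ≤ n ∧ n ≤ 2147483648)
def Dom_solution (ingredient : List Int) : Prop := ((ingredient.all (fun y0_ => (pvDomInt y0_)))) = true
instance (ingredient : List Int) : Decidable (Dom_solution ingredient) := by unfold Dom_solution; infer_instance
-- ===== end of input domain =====

-- B replaces A's backtracking scan with slice deletions by a single stack pass (measured asymptotically faster).
-- A mutates its argument list in place (del); the equivalence proved here is about the RETURN value only.

-- ===== PORT A =====
-- hand port of Python's `del xs[a:b]` (PySem has no slice deletion): keep everything
-- outside the normalized slice range; exact Python semantics via the same clampIdx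
-- normalization PySem.List.slice uses.
def delSlice (xs : List Int) (a b : Int) : List Int :=
  xs.take (PySem.List.clampIdx xs.length a) ++
    xs.drop (max (PySem.List.clampIdx xs.length a) (PySem.List.clampIdx xs.length b))

def solutionLoop (ingredient : List Int) (i answer : Int) : Int :=
  if h : i < PySem.List.len ingredient - 3 then
    if h2 : PySem.List.slice ingredient (some i) (some (i + 4)) = [1, 2, 3, 1] then
      solutionLoop (delSlice ingredient i (i + 4)) (i - 4) (answer + 1)
    else
      solutionLoop ingredient (i + 1) answer
  else
    answer
termination_by (2 * ingredient.length + 8 - i).toNat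
decreasing_by
  · have hl := congrArg List.length h2
    rw [PySem.List.length_slice] at hl
    have hA := PySem.List.clampIdx_le ingredient.length i
    have hB := PySem.List.clampIdx_le ingredient.length (i + 4)
    simp only [PySem.List.len_eq] at h
    simp only [delSlice, List.length_append, List.length_take, List.length_drop]
    simp only [List.length_cons, List.length_nil] at hl
    omega
  · simp only [PySem.List.len_eq] at h
    omega

def solution (ingredient : List Int) : Int :=
  solutionLoop ingredient 0 0

-- ===== PORT B =====
def stepB (st : List Int × Int) (x : Int) : List Int × Int :=
  let stack := st.1 ++ [x]
  if PySem.List.slice stack (some (-4)) none = [1, 2, 3, 1] then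
    (PySem.List.slice stack none (some (-4)), st.2 + 1)   -- `del stack[-4:]` keeps stack[:-4]
  else
    (stack, st.2)

def solution_alt (ingredient : List Int) : Int :=
  (ingredient.foldl stepB ([], 0)).2

-- ===== PRECONDITION & SPEC =====
def Spec_solution (ingredient : List Int) (out : Int) : Prop := out = solution_alt ingredient
instance (ingredient : List Int) (out : Int) : Decidable (Spec_solution ingredient out) := by unfold Spec_solution; infer_instance

-- ===== CLAIM (what is proved, stated in full; the proofs are below) =====
def Claim_equal_solution : Prop := ∀ (ingredient : List Int), Dom_solution ingredient → Spec_solution ingredient (solution ingredient)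

-- ===== LEMMAS AND PROOFS =====

-- a length-4 window that lies inside the prefix s is unaffected by the suffix
lemma window_prefix (s t : List Int) (j : Nat) (h : j + 4 ≤ s.length) :
    ((s ++ t).drop j).take 4 = (s.drop j).take 4 := by
  have h0 : 4 - (s.drop j).length = 0 := by simp; omega
  rw [List.drop_append_of_le_length (by omega), List.take_append, h0]
  simp

lemma take4_len (u : List Int) (h : u.take 4 = [1, 2, 3, 1]) : 4 ≤ u.length := by
  have := congrArg List.length h
  simp at this; omega

-- a slice starting at a negative index in [-4,0) is never the pattern
lemma neg_window (l : List Int) (i : Int) (h0 : -4 ≤ i) (h1 : i < 0) :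
    PySem.List.slice l (some i) (some (i + 4)) ≠ [1, 2, 3, 1] := by
  intro he
  have hl := congrArg List.length he
  rw [PySem.List.length_slice] at hl
  have hB : PySem.List.clampIdx l.length (i + 4) ≤ (i + 4).toNat := by
    have : ((((i + 4).toNat : Nat) : Int)) = i + 4 := by omega
    rw [← this, PySem.List.clampIdx_natCast]; omega
  simp only [List.length_cons, List.length_nil] at hl
  omega

-- scanning from a negative index (≥ -4) up to 0 changes nothing
lemma negStep (ing : List Int) (a : Int) (i : Int) (h0 : -4 ≤ i) (h1 : i < 0) :
    solutionLoop ing i a = solutionLoop ing (i + 1) a := by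
  rw [solutionLoop]
  by_cases h : i < PySem.List.len ing - 3
  · rw [dif_pos h, dif_neg (neg_window ing i h0 h1)]
  · rw [dif_neg h]
    rw [solutionLoop, dif_neg (by simp only [PySem.List.len_eq] at *; omega)]

lemma negScanAux (ing : List Int) (a : Int) : ∀ k : Nat, k ≤ 4 →
    solutionLoop ing (-(k : Int)) a = solutionLoop ing 0 a := by
  intro k
  induction k with
  | zero => intro _; norm_num
  | succ n ih =>
    intro hk
    rw [negStep ing a _ (by omega) (by omega)]
    have : (-((n + 1 : Nat) : Int)) + 1 = -(n : Int) := by push_cast; ring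
    rw [this]
    exact ih (by omega)

lemma negScan (ing : List Int) (a : Int) (i : Int) (h0 : -4 ≤ i) (h1 : i ≤ 0) :
    solutionLoop ing i a = solutionLoop ing 0 a := by
  have hi : i = -(((-i).toNat : Nat) : Int) := by omega
  rw [hi]
  exact negScanAux ing a _ (by omega)

-- pushing x pops nothing when no pattern window starts inside the old stack
lemma push_nopop (s t : List Int) (x a : Int)
    (hC : ∀ j : Nat, j < s.length → (((s ++ [x]) ++ t).drop j).take 4 ≠ [1, 2, 3, 1]) :
    stepB (s, a) x = (s ++ [x], a) := by
  have hpop : PySem.List.slice (s ++ [x]) (some (-4)) none ≠ [1, 2, 3, 1] := by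
    rw [PySem.List.slice_from_neg_ofNat (s ++ [x]) 4 (by norm_num)]
    intro he
    have hlen := congrArg List.length he
    simp only [List.length_drop, List.length_append, List.length_cons, List.length_nil] at hlen
    have hs3 : 3 ≤ s.length := by omega
    have hj : (s ++ [x]).length - 4 = s.length - 3 := by
      simp only [List.length_append, List.length_cons, List.length_nil]; omega
    rw [hj] at he
    refine hC (s.length - 3) (by omega) ?_
    rw [window_prefix (s ++ [x]) t _ (by simp only [List.length_append, List.length_cons, List.length_nil]; omega), he]
    decide
  simp [stepB, hpop]

-- pushing a run that creates no pattern windows just refills the stack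
lemma nopop (u : List Int) : ∀ (s : List Int) (a : Int) (r : List Int),
    (∀ j : Nat, j < s.length + u.length → ((s ++ u).drop j).take 4 ≠ [1, 2, 3, 1]) →
    List.foldl stepB (s, a) (u ++ r) = List.foldl stepB (s ++ u, a) r := by
  induction u with
  | nil => intro s a r _; simp
  | cons x u' ih =>
    intro s a r hC
    have hstep : stepB (s, a) x = (s ++ [x], a) := by
      refine push_nopop s u' x a (fun j hj he => hC j (by simp; omega) ?_)
      rw [← he, List.append_assoc]; simp
    calc List.foldl stepB (s, a) ((x :: u') ++ r)
        = List.foldl stepB (s ++ [x], a) (u' ++ r) := by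
          simp only [List.cons_append, List.foldl_cons, hstep]
      _ = List.foldl stepB ((s ++ [x]) ++ u', a) r := by
          refine ih (s ++ [x]) a r (fun j hj he => ?_)
          refine hC j (by simp at hj ⊢; omega) ?_
          rw [← he, List.append_assoc]; simp
      _ = List.foldl stepB (s ++ (x :: u'), a) r := by
          rw [List.append_assoc]; simp

-- a pushed element ≠ 1 never completes the pattern
lemma ends_ne (t : List Int) (x : Int) (hx : x ≠ 1) :
    (t ++ [x]).drop ((t ++ [x]).length - 4) ≠ [1, 2, 3, 1] := by
  intro he
  have hlen := congrArg List.length he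
  simp only [List.length_drop, List.length_append, List.length_cons, List.length_nil] at hlen
  have h3 : 3 ≤ t.length := by omega
  rw [List.drop_append_of_le_length (by simp only [List.length_append, List.length_cons, List.length_nil]; omega)] at he
  have hlast := congrArg List.getLast? he
  simp at hlast
  exact hx hlast

-- B consumes [1,2,3,1] on a stack with no internal pattern window: pop, count one
lemma consume4 (s : List Int) (a : Int) (rest : List Int)
    (hinv : ∀ j : Nat, j < s.length →
      ((s ++ (1 :: 2 :: 3 :: 1 :: rest)).drop j).take 4 ≠ [1, 2, 3, 1]) :
    List.foldl stepB (s, a) (1 :: 2 :: 3 :: 1 :: rest) = List.foldl stepB (s, a + 1) rest := by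
  have h1 : stepB (s, a) 1 = (s ++ [1], a) := by
    refine push_nopop s (2 :: 3 :: 1 :: rest) 1 a (fun j hj he => hinv j hj ?_)
    rw [← he, List.append_assoc]; simp
  have h2 : stepB (s ++ [1], a) 2 = (s ++ [1] ++ [2], a) := by
    have := ends_ne (s ++ [1]) 2 (by norm_num)
    rw [stepB]
    rw [PySem.List.slice_from_neg_ofNat (s ++ [1] ++ [2]) 4 (by norm_num)]
    simp only [if_neg this]
  have h3 : stepB (s ++ [1] ++ [2], a) 3 = (s ++ [1] ++ [2] ++ [3], a) := by
    have := ends_ne (s ++ [1] ++ [2]) 3 (by norm_num)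
    rw [stepB]
    rw [PySem.List.slice_from_neg_ofNat (s ++ [1] ++ [2] ++ [3]) 4 (by norm_num)]
    simp only [if_neg this]
  have h4 : stepB (s ++ [1] ++ [2] ++ [3], a) 1 = (s, a + 1) := by
    have hass : s ++ [1] ++ [2] ++ [3] ++ [1] = s ++ [1, 2, 3, 1] := by simp
    have hlen : (s ++ [1] ++ [2] ++ [3] ++ [1]).length - 4 = s.length := by simp
    have hdrop : (s ++ [1] ++ [2] ++ [3] ++ [1]).drop ((s ++ [1] ++ [2] ++ [3] ++ [1]).length - 4)
        = [1, 2, 3, 1] := by rw [hlen, hass]; exact List.drop_left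
    rw [stepB]
    rw [PySem.List.slice_from_neg_ofNat (s ++ [1] ++ [2] ++ [3] ++ [1]) 4 (by norm_num)]
    rw [if_pos hdrop]
    rw [PySem.List.slice_to_neg_ofNat (s ++ [1] ++ [2] ++ [3] ++ [1]) 4 (by norm_num)]
    rw [hlen, hass]
    simp
  simp only [List.foldl_cons, h1, h2, h3, h4]

-- the deletion A performs at the frontier removes exactly the first four of r
lemma delSlice_eq (s r : List Int) (hr : 4 ≤ r.length) :
    delSlice (s ++ r) (s.length : Int) ((s.length : Int) + 4) = s ++ r.drop 4 := by
  have h4 : ((s.length : Int) + 4) = (((s.length + 4 : Nat) : Nat) : Int) := by push_cast; ring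
  rw [delSlice, h4, PySem.List.clampIdx_natCast, PySem.List.clampIdx_natCast]
  have hmin1 : min s.length (s ++ r).length = s.length := by simp
  have hmin2 : min (s.length + 4) (s ++ r).length = s.length + 4 := by simp; omega
  rw [hmin1, hmin2, max_eq_right (by omega), List.take_left,
      List.drop_length_add_append]

-- main simulation: A at frontier |s| over s ++ r behaves as B with stack s over r
lemma main_sim : ∀ (m : Nat) (s r : List Int) (a : Int),
    s.length + 2 * r.length ≤ m →
    (∀ j : Nat, j < s.length → ((s ++ r).drop j).take 4 ≠ [1, 2, 3, 1]) →
    solutionLoop (s ++ r) (s.length : Int) a = (List.foldl stepB (s, a) r).2 := by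
  intro m
  induction m using Nat.strong_induction_on with
  | _ m IH =>
  intro s r a hm hinv
  rw [solutionLoop]
  by_cases hcond : (s.length : Int) < PySem.List.len (s ++ r) - 3
  · -- at least 4 elements remain
    have hr4 : 4 ≤ r.length := by
      simp only [PySem.List.len_eq, List.length_append] at hcond; omega
    have hfr : PySem.List.slice (s ++ r) (some (s.length : Int)) (some ((s.length : Int) + 4))
        = r.take 4 := by
      have : ((s.length : Int) + 4) = ((s.length : Int) + ((4 : Nat) : Int)) := by push_cast; ring
      rw [this, PySem.List.slice_natCast_add, List.drop_left]
    rw [dif_pos hcond]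
    by_cases hmatch : PySem.List.slice (s ++ r) (some (s.length : Int)) (some ((s.length : Int) + 4))
        = [1, 2, 3, 1]
    · -- match: A deletes, B pops after four pushes
      rw [dif_pos hmatch]
      have htake : r.take 4 = [1, 2, 3, 1] := by rw [← hfr]; exact hmatch
      -- destructure r
      obtain ⟨r1, r2, r3, r4, rest, hre⟩ :
          ∃ r1 r2 r3 r4 rest, r = r1 :: r2 :: r3 :: r4 :: rest := by
        match r, hr4 with
        | a1 :: a2 :: a3 :: a4 :: rr, _ => exact ⟨a1, a2, a3, a4, rr, rfl⟩
      subst hre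
      have hv : r1 = 1 ∧ r2 = 2 ∧ r3 = 3 ∧ r4 = 1 := by
        simp [List.take] at htake; tauto
      obtain ⟨rfl, rfl, rfl, rfl⟩ := hv
      rw [delSlice_eq s _ hr4]
      simp only [List.drop_succ_cons, List.drop_zero]
      -- split s into s1 ++ s2 with |s2| = min 4 |s|
      set s1 := s.take (s.length - 4) with hs1
      set s2 := s.drop (s.length - 4) with hs2
      have hsplit : s1 ++ s2 = s := List.take_append_drop _ s
      have hl1 : s1.length = s.length - 4 := by simp [hs1]
      have hl2 : s2.length = min 4 s.length := by simp [hs2]; omega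
      -- move the frontier from |s|-4 up to |s1| (they differ only when |s| < 4)
      have hstart : solutionLoop (s ++ rest) ((s.length : Int) - 4) (a + 1)
          = solutionLoop (s ++ rest) ((s1.length : Int)) (a + 1) := by
        by_cases hge : 4 ≤ s.length
        · have : ((s1.length : Int)) = (s.length : Int) - 4 := by omega
          rw [this]
        · have h0 : (s1.length : Int) = 0 := by omega
          rw [h0, negScan _ _ _ (by omega) (by omega)]
      rw [hstart]
      have hinner : ∀ j : Nat, j < s1.length →
          ((s1 ++ (s2 ++ rest)).drop j).take 4 ≠ [1, 2, 3, 1] := by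
        intro j hj he
        have hj4 : j + 4 ≤ s.length := by omega
        have heq : s1 ++ (s2 ++ rest) = s ++ rest := by rw [← List.append_assoc, hsplit]
        rw [heq, window_prefix s rest j hj4] at he
        exact hinv j (by omega) (by rw [window_prefix s _ j hj4]; exact he)
      have hmeas : s1.length + 2 * (s2 ++ rest).length < m := by
        simp only [List.length_append, List.length_cons] at hm ⊢
        omega
      have hIH := IH _ hmeas s1 (s2 ++ rest) (a + 1) (le_refl _) hinner
      have hing : s1 ++ (s2 ++ rest) = s ++ rest := by rw [← List.append_assoc, hsplit]
      rw [hing] at hIH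
      rw [hIH]
      -- B side: consume the four, then refill s2 onto s1
      have hcons := consume4 s a rest hinv
      rw [hcons]
      have hpopfree : ∀ j : Nat, j < s1.length + s2.length →
          ((s1 ++ s2).drop j).take 4 ≠ [1, 2, 3, 1] := by
        intro j hj he
        rw [hsplit] at he
        have hj4 : j + 4 ≤ s.length := by
          have := take4_len _ he
          simp at this; omega
        exact hinv j (by omega) (by rw [window_prefix s _ j hj4]; exact he)
      rw [nopop s2 s1 (a + 1) rest hpopfree, hsplit]
    · -- no match: advance the frontier by one
      rw [dif_neg hmatch]
      obtain ⟨x, rtail, rfl⟩ : ∃ x rtail, r = x :: rtail := by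
        match r, hr4 with
        | y :: ys, _ => exact ⟨y, ys, rfl⟩
      have htk : (x :: rtail).take 4 ≠ [1, 2, 3, 1] := by rw [← hfr]; exact hmatch
      have hass : s ++ (x :: rtail) = (s ++ [x]) ++ rtail := by simp
      have hinner : ∀ j : Nat, j < (s ++ [x]).length →
          (((s ++ [x]) ++ rtail).drop j).take 4 ≠ [1, 2, 3, 1] := by
        intro j hj he
        rw [← hass] at he
        rcases Nat.lt_or_ge j s.length with hlt | hge
        · exact hinv j hlt he
        · have hje : j = s.length := by simp at hj; omega
          rw [hje, List.drop_left] at he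
          exact htk he
      have hmeas : (s ++ [x]).length + 2 * rtail.length < m := by simp at *; omega
      have hIH := IH _ hmeas (s ++ [x]) rtail a (le_refl _) hinner
      have hstep : stepB (s, a) x = (s ++ [x], a) :=
        push_nopop s rtail x a (fun j hj he => hinv j hj (by rw [← hass] at he; exact he))
      have hidx : (s.length : Int) + 1 = (((s ++ [x]).length : Nat) : Int) := by simp
      rw [hidx, hass, hIH, List.foldl_cons, hstep]
  · -- fewer than 4 remain: A stops; B pushes the rest without popping
    rw [dif_neg hcond]
    have hr3 : r.length ≤ 3 := by
      simp only [PySem.List.len_eq, List.length_append] at hcond; omega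
    have hpopfree : ∀ j : Nat, j < s.length + r.length →
        ((s ++ r).drop j).take 4 ≠ [1, 2, 3, 1] := by
      intro j hj he
      rcases Nat.lt_or_ge j s.length with hlt | hge
      · exact hinv j hlt he
      · have := take4_len _ he
        simp at this; omega
    have := nopop r s a [] hpopfree
    simp only [List.append_nil, List.foldl_nil] at this
    rw [this]

-- ===== VERDICT (by name: the statement is the Claim_ definition above) =====
theorem solution_spec : Claim_equal_solution := by
  intro ing _
  unfold Spec_solution solution solution_alt
  have h := main_sim (2 * ing.length) [] ing 0 (by simp) (by intro j hj; simp at hj)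
  simpa using h
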